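-- pv_equiv track=rewrite | github.com/srvo/dewey | build/lib/dewey/core/crm/crm/old scripts/openfigi_lookup.py | filter_primary_listing
-- ===== SOURCE A (Python) =====
-- from typing import List, Dict, Any, Optional
--
-- def filter_primary_listing(figi_data_list: List[Dict]) -> Dict:
--     """Filter FIGI data to get the primary listing.
--
--     Prioritizes:
--     1. US exchange codes
--     2. Common Stock security type
--     3. Primary exchange for the region
--     """
--     # First try to find US common stock
--     for data in figi_data_list:
--         if (data.get('exchCode') == 'US' and
--             data.get('securityType') == 'Common Stock' and
--             data.get('marketSector') == 'Equity'):
--             return data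
--
--     # Then try any US listing
--     for data in figi_data_list:
--         if data.get('exchCode') == 'US':
--             return data
--
--     # Then try any common stock
--     for data in figi_data_list:
--         if data.get('securityType') == 'Common Stock':
--             return data
--
--     # Finally, just take the first one
--     return figi_data_list[0] if figi_data_list else None
-- ===== SOURCE B (Python) =====
-- def filter_primary_listing(figi_data_list):
--     """Single pass: keep the first element seen in each priority tier (same cost as A)."""
--     best1 = best2 = best3 = first = None
--     for data in figi_data_list:
--         if first is None:
--             first = data
--         if best1 is None and (data.get('exchCode') == 'US' and
--                               data.get('securityType') == 'Common Stock' and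
--                               data.get('marketSector') == 'Equity'):
--             best1 = data
--         if best2 is None and data.get('exchCode') == 'US':
--             best2 = data
--         if best3 is None and data.get('securityType') == 'Common Stock':
--             best3 = data
--     if best1 is not None:
--         return best1
--     if best2 is not None:
--         return best2
--     if best3 is not None:
--         return best3
--     return first
-- ===== Notes on version B (the rewrite author's own statement) =====
-- stated objective: alternative
-- what changed: Replaced A's three sequential scans (plus a final head lookup) by a single pass that records the first element of each priority tier in four Optional slots and picks the highest non-empty slot afterwards.
import Mathlib
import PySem

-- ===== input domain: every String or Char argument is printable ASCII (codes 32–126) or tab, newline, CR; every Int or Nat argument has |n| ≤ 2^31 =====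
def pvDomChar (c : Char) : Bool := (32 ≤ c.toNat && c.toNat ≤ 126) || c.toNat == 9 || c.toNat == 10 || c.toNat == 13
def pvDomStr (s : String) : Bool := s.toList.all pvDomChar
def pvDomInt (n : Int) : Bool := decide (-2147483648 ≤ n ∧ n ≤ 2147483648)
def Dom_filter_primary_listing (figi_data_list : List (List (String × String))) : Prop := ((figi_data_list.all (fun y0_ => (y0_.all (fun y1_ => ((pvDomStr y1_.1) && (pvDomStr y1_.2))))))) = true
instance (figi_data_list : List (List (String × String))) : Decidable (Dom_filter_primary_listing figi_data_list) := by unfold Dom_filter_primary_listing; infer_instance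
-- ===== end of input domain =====

-- B replaces A's three sequential scans by one pass keeping the first element of each
-- priority tier in four Optional slots (objective: alternative single-pass decomposition, same cost).

-- data.get(k) on a Python dict, here an insertion-ordered association list
def pvGet (d : List (String × String)) (k : String) : Option String :=
  (PySem.Dict.mk d).get? k

-- the three tier conditions, exactly as written in both Pythons
def pvTier1 (d : List (String × String)) : Bool :=
  (pvGet d "exchCode" == some "US") && (pvGet d "securityType" == some "Common Stock")
    && (pvGet d "marketSector" == some "Equity")
def pvTier2 (d : List (String × String)) : Bool := pvGet d "exchCode" == some "US"
def pvTier3 (d : List (String × String)) : Bool := pvGet d "securityType" == some "Common Stock"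

-- ===== PORT A =====
-- first loop: US common stock
def pvPass1 : List (List (String × String)) → Option (List (String × String))
  | [] => none
  | d :: rest => if pvTier1 d then some d else pvPass1 rest
-- second loop: any US listing
def pvPass2 : List (List (String × String)) → Option (List (String × String))
  | [] => none
  | d :: rest => if pvTier2 d then some d else pvPass2 rest
-- third loop: any common stock
def pvPass3 : List (List (String × String)) → Option (List (String × String))
  | [] => none
  | d :: rest => if pvTier3 d then some d else pvPass3 rest

def filter_primary_listing (figi_data_list : List (List (String × String))) : Option (List (String × String)) :=
  match pvPass1 figi_data_list with
  | some d => some d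
  | none =>
    match pvPass2 figi_data_list with
    | some d => some d
    | none =>
      match pvPass3 figi_data_list with
      | some d => some d
      | none =>
        match figi_data_list with
        | d :: _ => some d
        | [] => none

-- ===== PORT B =====
-- loop state: (best1, best2, best3, first)
def pvBState := Option (List (String × String)) × Option (List (String × String)) ×
  Option (List (String × String)) × Option (List (String × String))

def pvBStep (s : pvBState) (data : List (String × String)) : pvBState :=
  let (b1, b2, b3, f) := s
  let f := if f.isNone then some data else f
  let b1 := if b1.isNone && pvTier1 data then some data else b1
  let b2 := if b2.isNone && pvTier2 data then some data else b2
  let b3 := if b3.isNone && pvTier3 data then some data else b3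
  (b1, b2, b3, f)

def filter_primary_listing_alt (figi_data_list : List (List (String × String))) : Option (List (String × String)) :=
  let (b1, b2, b3, f) := figi_data_list.foldl pvBStep (none, none, none, none)
  match b1 with
  | some d => some d
  | none =>
    match b2 with
    | some d => some d
    | none =>
      match b3 with
      | some d => some d
      | none => f

-- ===== PRECONDITION & SPEC =====
def Spec_filter_primary_listing (figi_data_list : List (List (String × String))) (out : Option (List (String × String))) : Prop := out = filter_primary_listing_alt figi_data_list
instance (figi_data_list : List (List (String × String))) (out : Option (List (String × String))) : Decidable (Spec_filter_primary_listing figi_data_list out) := by unfold Spec_filter_primary_listing; infer_instance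

-- ===== CLAIM (what is proved, stated in full; the proofs are below) =====
def Claim_equal_filter_primary_listing : Prop := ∀ (figi_data_list : List (List (String × String))), Dom_filter_primary_listing figi_data_list → Spec_filter_primary_listing figi_data_list (filter_primary_listing figi_data_list)

-- ===== LEMMAS AND PROOFS =====
-- B's fold fills each slot with the first matching element (unless it was already set)
theorem pvFold_char (l : List (List (String × String)))
    (b1 b2 b3 f : Option (List (String × String))) :
    l.foldl pvBStep (b1, b2, b3, f)
      = (b1.or (pvPass1 l), b2.or (pvPass2 l), b3.or (pvPass3 l), f.or l.head?) := by
  induction l generalizing b1 b2 b3 f with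
  | nil => cases b1 <;> cases b2 <;> cases b3 <;> cases f <;> rfl
  | cons d rest ih =>
    simp only [List.foldl_cons, ih, pvBStep, pvPass1, pvPass2, pvPass3]
    cases b1 <;> cases b2 <;> cases b3 <;> cases f <;>
      simp [Option.or] <;> split_ifs <;> simp_all [Option.or]

-- ===== VERDICT (by name: the statement is the Claim_ definition above) =====
theorem filter_primary_listing_spec : Claim_equal_filter_primary_listing := by
  intro l _
  show filter_primary_listing l = filter_primary_listing_alt l
  unfold filter_primary_listing filter_primary_listing_alt
  rw [pvFold_char]
  simp only [Option.or]
  cases h1 : pvPass1 l <;> cases h2 : pvPass2 l <;> cases h3 : pvPass3 l <;>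
    cases l <;> simp_all
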